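-- pv_equiv track=rewrite | github.com/BohdanPiven/newrepository | app.py | get_unique_segments_with_counts
-- ===== SOURCE A (Python) =====
-- def get_segments():
--     """
--     Zwraca listę segmentów w ustalonej kolejności.
--     """
--     return [
--         "TSL World", "TSL EU", "TSL - World; West / East without BY&RU; EU",
--         "TSL West / East without BY&RU", "OTKPMM FCL / combi FTL",
--         "OTKPLSH FCL / combi FTL", "OTKPS", "OTKPT", "OTKPB",
--         "OKW", "OKW 20'", "Containers PL / non-normative",
--         "WT Premium", "WT Premium / Sea", "WT Premium / Rail", "Foreign EU / FCL, LCL",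
--         "Foreign EU / LCL / FCL / REF",
--         "FCL / West / South", "FCL / LCL / FTL / LTL / BALKANS / South", "OTKPMM FCL heavy",
--         "Foreign EU / FTL, LTL, FCL, LCL",
--         "Foreign EU / FTL, LTL, FCL, LCL no UA,BY,RU",
--         "Foreign EU / FTL, LTL, FCL, LCL from/to UA",
--         "Foreign EU / FTL, LTL, FCL, LCL, ADR no UA,BY,RU",
--         "Foreign EU / FTL, LTL, FCL, LCL no FR",
--         "Foreign EU / FTL, LTL, FCL, LCL + REF",
--         "Foreign EU + Scandinavie / FTL, LTL, FCL, LCL", "Ukraine - Europe - Ukraine",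
--         "Foreign EU / FTL, LTL", "Foreign EU / FTL, LTL, REF",
--         "Foreign EU / FTL +REF +ADR",
--         "Foreign EU / FTL, LTL from PL to CZ & EE",
--         "FTL / LTL + ADR Poland & Switzerland", "FLT / LTL with lift",
--         "FTL K", "Only REF", "LTL", "FTL / LTL K", "LTL K",
--         "LTL East Europe", "KOPER", "Only start from Koper",
--         "Turkey carriers TIMOKOM", "double-deck car carrier",
--         "CARGO Europe / Russia, Turkey, Asia",
--         "Foreign EU / only open trailers", "Central Europe",
--         "PL REF", "Central Europe only FTL", "Agency", "Rail Global", "DLG", "NON", "NEW1",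
--         "NEW2","NEW3","NEW2025_1", "NEW2025_2", "NEW2025_3", "NEW2025_4", "NEW2025_5"
--     ]
--
-- def get_unique_segments_with_counts(data):
--     """
--     Pobiera unikalne segmenty i liczy wystąpienia dla 'Polski' i 'Zagraniczny'.
--     """
--     ordered_segments = get_segments()
--     segments = {segment: {"Polski": 0, "Zagraniczny": 0} for segment in ordered_segments}
--
--     for row in data:
--         if len(row) > 16 and row[16]:
--             segment = row[16]
--             subsegment = row[23] if len(row) > 23 else ""
--             if segment in segments:
--                 if subsegment == "Polski":
--                     segments[segment]["Polski"] += 1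
--                 elif subsegment == "Zagraniczny":
--                     segments[segment]["Zagraniczny"] += 1
--     return segments
-- ===== SOURCE B (Python) =====
-- def get_segments():
--     return [
--         "TSL World", "TSL EU", "TSL - World; West / East without BY&RU; EU",
--         "TSL West / East without BY&RU", "OTKPMM FCL / combi FTL",
--         "OTKPLSH FCL / combi FTL", "OTKPS", "OTKPT", "OTKPB",
--         "OKW", "OKW 20'", "Containers PL / non-normative",
--         "WT Premium", "WT Premium / Sea", "WT Premium / Rail", "Foreign EU / FCL, LCL",
--         "Foreign EU / LCL / FCL / REF",
--         "FCL / West / South", "FCL / LCL / FTL / LTL / BALKANS / South", "OTKPMM FCL heavy",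
--         "Foreign EU / FTL, LTL, FCL, LCL",
--         "Foreign EU / FTL, LTL, FCL, LCL no UA,BY,RU",
--         "Foreign EU / FTL, LTL, FCL, LCL from/to UA",
--         "Foreign EU / FTL, LTL, FCL, LCL, ADR no UA,BY,RU",
--         "Foreign EU / FTL, LTL, FCL, LCL no FR",
--         "Foreign EU / FTL, LTL, FCL, LCL + REF",
--         "Foreign EU + Scandinavie / FTL, LTL, FCL, LCL", "Ukraine - Europe - Ukraine",
--         "Foreign EU / FTL, LTL", "Foreign EU / FTL, LTL, REF",
--         "Foreign EU / FTL +REF +ADR",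
--         "Foreign EU / FTL, LTL from PL to CZ & EE",
--         "FTL / LTL + ADR Poland & Switzerland", "FLT / LTL with lift",
--         "FTL K", "Only REF", "LTL", "FTL / LTL K", "LTL K",
--         "LTL East Europe", "KOPER", "Only start from Koper",
--         "Turkey carriers TIMOKOM", "double-deck car carrier",
--         "CARGO Europe / Russia, Turkey, Asia",
--         "Foreign EU / only open trailers", "Central Europe",
--         "PL REF", "Central Europe only FTL", "Agency", "Rail Global", "DLG", "NON", "NEW1",
--         "NEW2","NEW3","NEW2025_1", "NEW2025_2", "NEW2025_3", "NEW2025_4", "NEW2025_5"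
--     ]
--
-- def get_unique_segments_with_counts(data):
--     """Stage 1: project rows to (segment, subsegment) labels; stage 2: count per
--     segment by scanning the label list (no mutated accumulator at all).  A label
--     whose segment is unknown simply matches no segment in stage 2, so the explicit
--     membership test disappears."""
--     labels = [(row[16], row[23] if len(row) > 23 else "")
--               for row in data if len(row) > 16 and row[16]]
--     return {seg: {"Polski": sum(1 for s, t in labels if s == seg and t == "Polski"),
--                   "Zagraniczny": sum(1 for s, t in labels if s == seg and t == "Zagraniczny")}
--             for seg in get_segments()}
-- ===== Notes on version B (the rewrite author's own statement) =====
-- stated objective: alternative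
-- what changed: B replaces A's single pass that mutates a pre-zeroed nested dict by two staged passes with no mutable accumulator: first project data to a list of (segment, subsegment) labels, then build the result by counting each segment's labels with a per-segment scan (the membership test against the segment set disappears, since an unknown segment matches nothing in the counting stage).
import Mathlib
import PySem

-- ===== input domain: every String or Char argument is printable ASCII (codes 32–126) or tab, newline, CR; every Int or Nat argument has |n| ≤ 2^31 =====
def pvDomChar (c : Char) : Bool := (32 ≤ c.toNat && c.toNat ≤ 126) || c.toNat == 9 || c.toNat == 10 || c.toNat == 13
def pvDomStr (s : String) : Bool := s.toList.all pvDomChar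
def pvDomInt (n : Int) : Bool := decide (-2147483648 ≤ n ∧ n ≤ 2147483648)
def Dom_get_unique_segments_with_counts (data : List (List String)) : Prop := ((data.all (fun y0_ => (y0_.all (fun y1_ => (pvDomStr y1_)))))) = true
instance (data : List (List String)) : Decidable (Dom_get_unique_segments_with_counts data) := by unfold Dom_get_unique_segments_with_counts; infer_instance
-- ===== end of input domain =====

-- B replaces A's mutated pre-zeroed nested dict by a projection pass to (segment, subsegment)
-- labels followed by a per-segment counting scan (alternative decomposition, no accumulator).


def get_segments : List String := [
  "TSL World", "TSL EU", "TSL - World; West / East without BY&RU; EU",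
  "TSL West / East without BY&RU", "OTKPMM FCL / combi FTL",
  "OTKPLSH FCL / combi FTL", "OTKPS", "OTKPT", "OTKPB",
  "OKW", "OKW 20'", "Containers PL / non-normative",
  "WT Premium", "WT Premium / Sea", "WT Premium / Rail", "Foreign EU / FCL, LCL",
  "Foreign EU / LCL / FCL / REF",
  "FCL / West / South", "FCL / LCL / FTL / LTL / BALKANS / South", "OTKPMM FCL heavy",
  "Foreign EU / FTL, LTL, FCL, LCL",
  "Foreign EU / FTL, LTL, FCL, LCL no UA,BY,RU",
  "Foreign EU / FTL, LTL, FCL, LCL from/to UA",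
  "Foreign EU / FTL, LTL, FCL, LCL, ADR no UA,BY,RU",
  "Foreign EU / FTL, LTL, FCL, LCL no FR",
  "Foreign EU / FTL, LTL, FCL, LCL + REF",
  "Foreign EU + Scandinavie / FTL, LTL, FCL, LCL", "Ukraine - Europe - Ukraine",
  "Foreign EU / FTL, LTL", "Foreign EU / FTL, LTL, REF",
  "Foreign EU / FTL +REF +ADR",
  "Foreign EU / FTL, LTL from PL to CZ & EE",
  "FTL / LTL + ADR Poland & Switzerland", "FLT / LTL with lift",
  "FTL K", "Only REF", "LTL", "FTL / LTL K", "LTL K",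
  "LTL East Europe", "KOPER", "Only start from Koper",
  "Turkey carriers TIMOKOM", "double-deck car carrier",
  "CARGO Europe / Russia, Turkey, Asia",
  "Foreign EU / only open trailers", "Central Europe",
  "PL REF", "Central Europe only FTL", "Agency", "Rail Global", "DLG", "NON", "NEW1",
  "NEW2", "NEW3", "NEW2025_1", "NEW2025_2", "NEW2025_3", "NEW2025_4", "NEW2025_5"]

-- ===== PORT A =====
-- the dict-of-dicts state has unique keys throughout, so the in-place increment
-- 'segments[segment][sub] += 1' is ported exactly as a map that rewrites the matching entries
def updA (segments : List (String × List (String × Int))) (row : List String) :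
    List (String × List (String × Int)) :=
  if 16 < row.length ∧ PySem.List.pyGetD row 16 "" ≠ "" then
    let segment := PySem.List.pyGetD row 16 ""
    let subsegment := if 23 < row.length then PySem.List.pyGetD row 23 "" else ""
    if segments.any (fun p => p.1 == segment) then
      if subsegment = "Polski" then
        segments.map (fun p =>
          if p.1 == segment then
            (p.1, p.2.map (fun q => if q.1 == "Polski" then (q.1, q.2 + 1) else q))
          else p)
      else if subsegment = "Zagraniczny" then
        segments.map (fun p =>
          if p.1 == segment then
            (p.1, p.2.map (fun q => if q.1 == "Zagraniczny" then (q.1, q.2 + 1) else q))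
          else p)
      else segments
    else segments
  else segments

def get_unique_segments_with_counts (data : List (List String)) :
    List (String × List (String × Int)) :=
  let segments := get_segments.map
    (fun segment => (segment, [("Polski", (0 : Int)), ("Zagraniczny", (0 : Int))]))
  data.foldl updA segments

-- ===== PORT B =====
-- stage 1: the list comprehension of Source B, a filter+project over the rows
def pvLabels (data : List (List String)) : List (String × String) :=
  data.filterMap (fun row =>
    if 16 < row.length ∧ PySem.List.pyGetD row 16 "" ≠ "" then
      some (PySem.List.pyGetD row 16 "",
            if 23 < row.length then PySem.List.pyGetD row 23 "" else "")
    else none)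

-- stage 2: 'sum(1 for s, t in labels if s == seg and t == sub)' = countP over the labels
def get_unique_segments_with_counts_alt (data : List (List String)) :
    List (String × List (String × Int)) :=
  let labels := pvLabels data
  get_segments.map (fun seg =>
    (seg, [("Polski",
             ((labels.countP (fun p => p.1 == seg && p.2 == "Polski") : Nat) : Int)),
           ("Zagraniczny",
             ((labels.countP (fun p => p.1 == seg && p.2 == "Zagraniczny") : Nat) : Int))]))

-- ===== PRECONDITION & SPEC =====
def Spec_get_unique_segments_with_counts (data : List (List String)) (out : List (String × List (String × Int))) : Prop := out = get_unique_segments_with_counts_alt data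
instance (data : List (List String)) (out : List (String × List (String × Int))) : Decidable (Spec_get_unique_segments_with_counts data out) := by unfold Spec_get_unique_segments_with_counts; infer_instance

-- ===== CLAIM (what is proved, stated in full; the proofs are below) =====
def Claim_equal_get_unique_segments_with_counts : Prop := ∀ (data : List (List String)), Dom_get_unique_segments_with_counts data → Spec_get_unique_segments_with_counts data (get_unique_segments_with_counts data)

-- ===== LEMMAS AND PROOFS =====
-- count table built from an arbitrary label list (B's output on data is tableOf (pvLabels data))
def tableOf (t : List (String × String)) : List (String × List (String × Int)) :=
  get_segments.map (fun seg =>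
    (seg, [("Polski", ((t.countP (fun p => p.1 == seg && p.2 == "Polski") : Nat) : Int)),
           ("Zagraniczny", ((t.countP (fun p => p.1 == seg && p.2 == "Zagraniczny") : Nat) : Int))]))

def labelOf (row : List String) : Option (String × String) :=
  if 16 < row.length ∧ PySem.List.pyGetD row 16 "" ≠ "" then
    some (PySem.List.pyGetD row 16 "",
          if 23 < row.length then PySem.List.pyGetD row 23 "" else "")
  else none

theorem tableOf_nil :
    tableOf [] = get_segments.map
      (fun segment => (segment, [("Polski", (0 : Int)), ("Zagraniczny", (0 : Int))])) := by
  simp [tableOf]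

theorem step_comm (t : List (String × String)) (row : List String) :
    updA (tableOf t) row = tableOf (t ++ (labelOf row).toList) := by
  unfold updA labelOf
  by_cases hc : 16 < row.length ∧ PySem.List.pyGetD row 16 "" ≠ ""
  · simp only [if_pos hc, Option.toList_some]
    set seg := PySem.List.pyGetD row 16 "" with hsegdef
    set sub := (if 23 < row.length then PySem.List.pyGetD row 23 "" else "") with hsubdef
    clear_value seg sub
    by_cases hmem : seg ∈ get_segments
    · have hany : ((tableOf t).any (fun p => p.1 == seg)) = true := by
        simp [tableOf, List.any_map, Function.comp]; exact hmem
      rw [hany]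
      simp only [if_true]
      by_cases hP : sub = "Polski"
      · subst hP
        unfold tableOf
        rw [List.map_map]
        apply List.map_congr_left
        intro s _
        by_cases hs : s = seg
        · subst hs
          simp [List.countP_append]
        · have h1 : (s == seg) = false := by simp [hs]
          simp [Function.comp, h1, List.countP_append]
          exact fun h => hs h.symm
      · by_cases hZ : sub = "Zagraniczny"
        · subst hZ
          simp only [if_neg hP]
          unfold tableOf
          rw [List.map_map]
          apply List.map_congr_left
          intro s _
          by_cases hs : s = seg
          · subst hs
            simp [List.countP_append]
          · have h1 : (s == seg) = false := by simp [hs]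
            simp [Function.comp, h1, List.countP_append]
            exact fun h => hs h.symm
        · simp only [if_neg hP, if_neg hZ]
          unfold tableOf
          apply List.map_congr_left
          intro s _
          simp [List.countP_append, hP, hZ]
    · have hany : ((tableOf t).any (fun p => p.1 == seg)) = false := by
        simp [tableOf, List.any_map, Function.comp]
        intro x hx h; exact hmem (h ▸ hx)
      rw [hany]
      simp only [Bool.false_eq_true, if_false]
      unfold tableOf
      apply List.map_congr_left
      intro s hsmem
      have hs : ¬ s = seg := fun h => hmem (h ▸ hsmem)
      have h1 : (seg == s) = false := by
        simp only [beq_eq_false_iff_ne, ne_eq]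
        exact fun h => hs h.symm
      simp [List.countP_append, h1]
  · simp only [if_neg hc, Option.toList_none, List.append_nil]

theorem foldl_comm (data : List (List String)) (t : List (String × String)) :
    data.foldl updA (tableOf t) = tableOf (t ++ pvLabels data) := by
  induction data generalizing t with
  | nil => simp [pvLabels]
  | cons row rest ih =>
    have : pvLabels (row :: rest) = (labelOf row).toList ++ pvLabels rest := by
      cases h : labelOf row <;>
        simp [pvLabels, labelOf, List.filterMap_cons] at h ⊢ <;>
        split_ifs with hc <;> simp_all
    rw [List.foldl_cons, step_comm, ih, this, List.append_assoc]

-- ===== VERDICT (by name: the statement is the Claim_ definition above) =====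
theorem get_unique_segments_with_counts_spec : Claim_equal_get_unique_segments_with_counts := by
  intro data _
  unfold Spec_get_unique_segments_with_counts get_unique_segments_with_counts get_unique_segments_with_counts_alt
  rw [← tableOf_nil, foldl_comm, List.nil_append]
  rfl
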